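-- pv_equiv track=rewrite | github.com/martintierro/ALGOCOM-Solutions | upordown.py | solve
-- ===== SOURCE A (Python) =====
-- def solve(n, m, valence):
--     MOD = 1000000007
--     answers = [[0]*(m+1) for i in range(n+2)]
--     for position in range(n+2):
--         for p_val in range(m+1):
--             if position == 0:
--                 answers[position][p_val] = 1
--             elif valence[position-1] == "1":
--                 for j in range(p_val-1):
--                     answers[position][p_val] += answers[position-1][j]
--             elif valence[position-1] == "0":
--                 for j in range(p_val+1, m+1):
--                     answers[position][p_val] += answers[position-1][j]
--             elif valence[position-1] == "-":
--                 answers[position][p_val] = answers[position-1][p_val]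
--     return sum(answers[n+1])
-- ===== SOURCE B (Python) =====
-- def solve(n, m, valence):
--     width = m + 1
--     if width <= 0:
--         return 0
--     row = [1] * width
--     for position in range(1, n + 2):
--         c = valence[position - 1]
--         if c == "1":
--             # pref[k] = sum of row[:k]; new[p] = sum(row[:p-1]) in O(1)
--             pref = [0]
--             for x in row:
--                 pref.append(pref[-1] + x)
--             row = [pref[p - 1] if p > 0 else 0 for p in range(width)]
--         elif c == "0":
--             # sufr[k] = sum of the last k entries of row; new[p] = sum(row[p+1:])
--             sufr = [0]
--             for x in reversed(row):
--                 sufr.append(sufr[-1] + x)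
--             row = [sufr[width - 1 - p] for p in range(width)]
--         elif c != "-":
--             row = [0] * width
--     return sum(row)
-- ===== Notes on version B (the rewrite author's own statement) =====
-- stated objective: faster
-- what changed: B keeps only the previous DP row and replaces A's O(m) inner range-sum loops by prefix/suffix running-sum arrays, so each row entry is computed in O(1) instead of by re-summing a slice of the previous row.
import Mathlib
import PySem

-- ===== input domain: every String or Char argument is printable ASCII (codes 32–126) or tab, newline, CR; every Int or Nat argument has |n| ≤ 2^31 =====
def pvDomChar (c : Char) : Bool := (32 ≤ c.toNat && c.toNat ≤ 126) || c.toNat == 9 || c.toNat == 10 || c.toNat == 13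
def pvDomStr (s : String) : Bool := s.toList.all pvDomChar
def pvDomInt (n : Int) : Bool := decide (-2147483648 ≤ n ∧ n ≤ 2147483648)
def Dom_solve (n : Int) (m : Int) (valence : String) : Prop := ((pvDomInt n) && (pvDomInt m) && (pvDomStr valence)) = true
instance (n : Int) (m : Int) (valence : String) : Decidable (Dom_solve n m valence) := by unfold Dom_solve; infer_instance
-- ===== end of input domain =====

-- B replaces A's O(m) inner range-sums by prefix/suffix running sums over the previous
-- DP row, turning each row update into O(m): asymptotically faster (O(n*m) vs O(n*m^2)).

-- ===== PORT A =====
-- entry computed for answers[position][p_val] when position ≥ 1 (the += loops, as folds)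
def solveEntryA (valence : String) (m : Int) (prev : List Int) (position p : Int) : Int :=
  if PySem.Str.pyGet? valence (position - 1) = some '1' then
    (PySem.List.pyRange 0 (p - 1) 1).foldl (fun acc j => acc + PySem.List.pyGetD prev j 0) 0
  else if PySem.Str.pyGet? valence (position - 1) = some '0' then
    (PySem.List.pyRange (p + 1) (m + 1) 1).foldl (fun acc j => acc + PySem.List.pyGetD prev j 0) 0
  else if PySem.Str.pyGet? valence (position - 1) = some '-' then
    PySem.List.pyGetD prev p 0
  else 0

def solve (n : Int) (m : Int) (valence : String) : Int :=
  -- answers = [[0]*(m+1) for i in range(n+2)]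
  let answers : List (List Int) :=
    (PySem.List.pyRange 0 (n + 2) 1).map (fun _ =>
      (PySem.List.pyRange 0 (m + 1) 1).map (fun _ => (0 : Int)))
  -- the double loop; each cell's += accumulation is the fold in solveEntryA
  let answers :=
    (PySem.List.pyRange 0 (n + 2) 1).foldl (fun tbl position =>
      tbl.set position.toNat
        ((PySem.List.pyRange 0 (m + 1) 1).map (fun p =>
          if position = 0 then 1
          else solveEntryA valence m (PySem.List.pyGetD tbl (position - 1) []) position p)))
      answers
  -- return sum(answers[n+1])
  (PySem.List.pyGetD answers (n + 1) []).foldl (· + ·) 0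

-- ===== PORT B =====
-- pref = [0]; for x in xs: pref.append(pref[-1] + x)
def prefFoldB (xs : List Int) : List Int :=
  xs.foldl (fun l x => l ++ [PySem.List.pyGetD l (-1) 0 + x]) [0]

def solve_alt (n : Int) (m : Int) (valence : String) : Int :=
  let width := m + 1
  if width ≤ 0 then 0
  else
    let row0 : List Int := List.replicate width.toNat 1
    let final :=
      (PySem.List.pyRange 1 (n + 2) 1).foldl (fun row position =>
        let c := (PySem.Str.pyGet? valence (position - 1)).getD ' '
        if c = '1' then
          let pref := prefFoldB row
          (PySem.List.pyRange 0 width 1).map (fun p =>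
            if p > 0 then PySem.List.pyGetD pref (p - 1) 0 else 0)
        else if c = '0' then
          let sufr := prefFoldB row.reverse
          (PySem.List.pyRange 0 width 1).map (fun p =>
            PySem.List.pyGetD sufr (width - 1 - p) 0)
        else if c ≠ '-' then List.replicate width.toNat 0
        else row) row0
    final.foldl (· + ·) 0

-- ===== PRECONDITION & SPEC =====
-- Pre_ excludes exactly the inputs where the Python A raises: n ≤ -2 (IndexError on
-- answers[n+1]) and, when both loops are nonempty, a valence too short (IndexError).
def Pre_solve (n : Int) (m : Int) (valence : String) : Prop :=
  -1 ≤ n ∧ (0 ≤ n → 0 ≤ m → n + 1 ≤ (valence.toList.length : Int))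
instance (n : Int) (m : Int) (valence : String) : Decidable (Pre_solve n m valence) := by
  unfold Pre_solve; infer_instance

def pvWitness_solve : Int × Int × String := (3, 2, "10-x")

def Spec_solve (n : Int) (m : Int) (valence : String) (out : Int) : Prop := out = solve_alt n m valence
instance (n : Int) (m : Int) (valence : String) (out : Int) : Decidable (Spec_solve n m valence out) := by unfold Spec_solve; infer_instance

-- ===== CLAIM (what is proved, stated in full; the proofs are below) =====
def Claim_equal_solve : Prop := ∀ (n : Int) (m : Int) (valence : String), Dom_solve n m valence → Pre_solve n m valence → Spec_solve n m valence (solve n m valence)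

-- ===== LEMMAS AND PROOFS =====

-- proof-side names for the two fold bodies (definitionally the lambdas of the ports)
def stepA (valence : String) (m : Int) (tbl : List (List Int)) (position : Int) : List (List Int) :=
  tbl.set position.toNat
    ((PySem.List.pyRange 0 (m + 1) 1).map (fun p =>
      if position = 0 then 1
      else solveEntryA valence m (PySem.List.pyGetD tbl (position - 1) []) position p))

def stepB (valence : String) (m : Int) (row : List Int) (position : Int) : List Int :=
  let c := (PySem.Str.pyGet? valence (position - 1)).getD ' '
  if c = '1' then
    let pref := prefFoldB row
    (PySem.List.pyRange 0 (m + 1) 1).map (fun p =>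
      if p > 0 then PySem.List.pyGetD pref (p - 1) 0 else 0)
  else if c = '0' then
    let sufr := prefFoldB row.reverse
    (PySem.List.pyRange 0 (m + 1) 1).map (fun p =>
      PySem.List.pyGetD sufr (m + 1 - 1 - p) 0)
  else if c ≠ '-' then List.replicate (m + 1).toNat 0
  else row

def initA (n m : Int) : List (List Int) :=
  (PySem.List.pyRange 0 (n + 2) 1).map (fun _ =>
    (PySem.List.pyRange 0 (m + 1) 1).map (fun _ => (0 : Int)))

theorem solve_eq (n m : Int) (valence : String) :
    solve n m valence =
      (PySem.List.pyGetD
        ((PySem.List.pyRange 0 (n + 2) 1).foldl (stepA valence m) (initA n m)) (n + 1) []).foldl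
        (· + ·) 0 := rfl

theorem solve_alt_eq (n m : Int) (valence : String) (hm : ¬ m + 1 ≤ 0) :
    solve_alt n m valence =
      ((PySem.List.pyRange 1 (n + 2) 1).foldl (stepB valence m)
        (List.replicate (m + 1).toNat 1)).foldl (· + ·) 0 := by
  simp only [solve_alt, if_neg hm]
  rfl

-- the row sequence both programs compute
def rowsA (valence : String) (m : Int) : Nat → List Int
  | 0 => (PySem.List.pyRange 0 (m + 1) 1).map (fun _ => 1)
  | K + 1 => (PySem.List.pyRange 0 (m + 1) 1).map
      (fun p => solveEntryA valence m (rowsA valence m K) ((K : Int) + 1) p)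

theorem rowsA_length (valence : String) (m : Int) (K : Nat) :
    (rowsA valence m K).length = (m + 1).toNat := by
  cases K <;> simp [rowsA, PySem.List.length_pyRange_one]

-- running prefix sums
def psum (s : Int) : List Int → List Int
  | [] => []
  | x :: xs => (s + x) :: psum (s + x) xs

theorem psum_length (s : Int) (xs : List Int) : (psum s xs).length = xs.length := by
  induction xs generalizing s with
  | nil => rfl
  | cons x xs ih => simp [psum, ih]

theorem psum_get (xs : List Int) (s : Int) (k : Nat) (hk : k < xs.length) :
    (psum s xs)[k]? = some (s + (xs.take (k + 1)).sum) := by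
  induction xs generalizing s k with
  | nil => simp at hk
  | cons x xs ih =>
    cases k with
    | zero => simp [psum]
    | succ k =>
      simp only [psum, List.getElem?_cons_succ]
      rw [ih (s + x) k (by simpa using hk)]
      simp [add_assoc]

theorem prefFold_aux (xs l0 : List Int) (y : Int) :
    xs.foldl (fun l x => l ++ [PySem.List.pyGetD l (-1) 0 + x]) (l0 ++ [y]) =
      (l0 ++ [y]) ++ psum y xs := by
  induction xs generalizing l0 y with
  | nil => simp [psum]
  | cons x xs ih =>
    simp only [List.foldl_cons, PySem.List.pyGetD_neg_one_append_singleton]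
    rw [List.append_assoc l0 [y] [y + x]]
    have := ih (l0 ++ [y]) (y + x)
    simp only [List.append_assoc] at this ⊢
    rw [this]
    simp [psum]

theorem prefFoldB_eq (xs : List Int) : prefFoldB xs = 0 :: psum 0 xs := by
  have := prefFold_aux xs [] 0
  simpa [prefFoldB] using this

theorem prefFoldB_get (xs : List Int) (k : Nat) (hk : k ≤ xs.length) :
    (prefFoldB xs)[k]? = some ((xs.take k).sum) := by
  rw [prefFoldB_eq]
  cases k with
  | zero => simp
  | succ k =>
    simp only [List.getElem?_cons_succ]
    rw [psum_get xs 0 k (by omega)]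
    simp

theorem prefFoldB_length (xs : List Int) : (prefFoldB xs).length = xs.length + 1 := by
  rw [prefFoldB_eq]; simp [psum_length]

-- A's inner '+=' loop over range(0, t) is the sum of a prefix of prev
theorem foldl_rangeSum (prev : List Int) (t : Int) (ht : t ≤ (prev.length : Int)) :
    (PySem.List.pyRange 0 t 1).foldl (fun acc j => acc + PySem.List.pyGetD prev j 0) 0 =
      (prev.take t.toNat).sum := by
  by_cases h0 : t ≤ 0
  · rw [PySem.List.pyRange_one_eq_nil h0]
    have : t.toNat = 0 := by omega
    simp [this]
  · rw [not_le] at h0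
    set u := prev.take t.toNat with hu
    have hul : (u.length : Int) = t := by
      simp [hu, List.length_take]; omega
    have hcong : (PySem.List.pyRange 0 t 1).foldl
        (fun acc j => acc + PySem.List.pyGetD prev j 0) 0 =
        (PySem.List.pyRange 0 t 1).foldl
        (fun acc j => acc + PySem.List.pyGetD u j 0) 0 := by
      apply PySem.List.foldl_congr_mem
      intro acc x hx
      rw [PySem.List.mem_pyRange_one] at hx
      rw [PySem.List.pyGetD_eq_getElem prev 0 hx.1 (by omega),
          PySem.List.pyGetD_eq_getElem u 0 hx.1 (by omega)]
      simp [hu, List.getElem_take]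
    rw [hcong, ← hul,
        PySem.List.foldl_pyRange_zero_pyGetD' u 0 (fun acc v => acc + v) 0,
        ← List.sum_eq_foldl]


-- one B step equals one A row, given the previous row has width m+1
theorem stepB_eq (valence : String) (m : Int) (hm : 0 ≤ m) (position : Int)
    (prev : List Int) (hl : prev.length = (m + 1).toNat) :
    stepB valence m prev position =
      (PySem.List.pyRange 0 (m + 1) 1).map
        (fun p => solveEntryA valence m prev position p) := by
  have hlen : (prev.length : Int) = m + 1 := by
    rw [hl, Int.toNat_of_nonneg (by omega)]
  rcases hc : PySem.Str.pyGet? valence (position - 1) with _ | ch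
  · -- Python would raise here; both ports produce the zero row
    simp only [stepB, hc, Option.getD_none, ne_eq]
    rw [if_neg (by decide), if_neg (by decide), if_pos (by decide)]
    symm
    rw [List.eq_replicate_iff]
    refine ⟨by simp [PySem.List.length_pyRange_one], ?_⟩
    intro b hb
    obtain ⟨p, hp, hbe⟩ := List.mem_map.mp hb
    simp only [solveEntryA, hc, reduceCtorEq, reduceIte] at hbe
    exact hbe.symm
  · by_cases h1 : ch = '1'
    · subst h1
      simp only [stepB, hc, Option.getD_some]
      rw [if_pos (by decide)]
      apply List.map_congr_left
      intro p hp
      rw [PySem.List.mem_pyRange_one] at hp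
      simp only [solveEntryA, hc, Option.some.injEq, if_true]
      rw [foldl_rangeSum prev (p - 1) (by rw [hlen]; omega)]
      by_cases hp0 : p > 0
      · rw [if_pos hp0]
        have hk : (p - 1).toNat ≤ prev.length := by omega
        have hpl := prefFoldB_length prev
        rw [PySem.List.pyGetD_eq_getElem (prefFoldB prev) 0 (by omega) (by
          push_cast [hpl]; omega)]
        have hsome := prefFoldB_get prev (p - 1).toNat hk
        rw [List.getElem?_eq_getElem (by omega)] at hsome
        exact Option.some_injective _ hsome
      · rw [if_neg hp0]
        have hp' : p = 0 := by omega
        subst hp'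
        simp
    · by_cases h0 : ch = '0'
      · subst h0
        simp only [stepB, hc, Option.getD_some]
        rw [if_neg (by decide), if_pos (by decide)]
        apply List.map_congr_left
        intro p hp
        rw [PySem.List.mem_pyRange_one] at hp
        simp only [solveEntryA, hc, Option.some.injEq]
        rw [if_neg (by decide), if_pos (by decide)]
        -- left side: suffix sum read off the reversed prefix sums
        rw [show m + 1 - 1 - p = (((m - p).toNat : Nat) : Int) by omega]
        have hrl : prev.reverse.length = prev.length := List.length_reverse
        have hk : (m - p).toNat ≤ prev.reverse.length := by omega
        have hpl := prefFoldB_length prev.reverse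
        rw [PySem.List.pyGetD_eq_getElem (prefFoldB prev.reverse) 0 (by omega) (by
          push_cast [hpl, hrl]; omega)]
        have hsome := prefFoldB_get prev.reverse (m - p).toNat hk
        rw [List.getElem?_eq_getElem (by omega)] at hsome
        simp only [Int.toNat_natCast]
        rw [Option.some_injective _ hsome]
        -- right side: A's fold over range(p+1, m+1)
        rw [show m + 1 = (prev.length : Int) from hlen.symm,
            PySem.List.foldl_pyRange_pyGetD' prev 0 (fun acc v => acc + v) 0 (by omega),
            ← List.sum_eq_foldl]
        rw [List.take_reverse, List.sum_reverse,
            show prev.length - (m - p).toNat = (p + 1).toNat by omega]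
      · by_cases hd : ch = '-'
        · subst hd
          simp only [stepB, hc, Option.getD_some, ne_eq]
          rw [if_neg (by decide), if_neg (by decide), if_neg (by decide)]
          have hmap : ∀ p ∈ PySem.List.pyRange 0 (m + 1) 1,
              solveEntryA valence m prev position p = PySem.List.pyGetD prev p 0 := by
            intro p hp
            simp only [solveEntryA, hc, Option.some.injEq]
            rw [if_neg (by decide), if_neg (by decide), if_pos (by decide)]
          rw [List.map_congr_left hmap,
              show m + 1 = (prev.length : Int) from hlen.symm,
              PySem.List.map_pyGetD_pyRange_zero' prev 0]
        · -- some other character: both give the zero row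
          simp only [stepB, hc, Option.getD_some, ne_eq]
          rw [if_neg h1, if_neg h0, if_pos (by exact hd)]
          symm
          rw [List.eq_replicate_iff]
          refine ⟨by simp [PySem.List.length_pyRange_one], ?_⟩
          intro b hb
          obtain ⟨p, hp, hbe⟩ := List.mem_map.mp hb
          rw [solveEntryA, hc] at hbe
          rw [if_neg (by simp [h1]), if_neg (by simp [h0]), if_neg (by simp [hd])] at hbe
          exact hbe.symm

-- the A-side table fold: row K of the table is rowsA K
theorem foldl_stepA_length (valence : String) (m : Int) (l : List Int)
    (tbl : List (List Int)) :
    (l.foldl (stepA valence m) tbl).length = tbl.length := by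
  induction l generalizing tbl with
  | nil => rfl
  | cons x xs ih => simp [List.foldl_cons, ih, stepA]

theorem foldl_stepA_all_nil (valence : String) (m : Int) (hm : m + 1 ≤ 0)
    (l : List Int) (tbl : List (List Int)) (h : ∀ x ∈ tbl, x = []) :
    ∀ x ∈ l.foldl (stepA valence m) tbl, x = [] := by
  induction l generalizing tbl with
  | nil => exact h
  | cons a as ih =>
    simp only [List.foldl_cons]
    apply ih
    intro x hx
    rcases List.mem_or_eq_of_mem_set hx with h1 | h2
    · exact h x h1
    · rw [h2, PySem.List.pyRange_one_eq_nil hm, List.map_nil]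

theorem tblA_get (valence : String) (m n : Int) (hn : -1 ≤ n) (K : Nat)
    (hK : (K : Int) ≤ n + 1) :
    ((PySem.List.pyRange 0 ((K : Int) + 1) 1).foldl (stepA valence m)
      (initA n m))[K]? = some (rowsA valence m K) := by
  have hinit : (initA n m).length = (n + 2).toNat := by
    simp [initA, PySem.List.length_pyRange_one]
  induction K with
  | zero =>
    simp only [Nat.cast_zero, zero_add]
    rw [PySem.List.pyRange_one_cons (by omega), PySem.List.pyRange_one_eq_nil (by omega)]
    simp only [List.foldl_cons, List.foldl_nil, stepA]
    rw [show ((0 : Int)).toNat = 0 from rfl, List.getElem?_set_self (by omega)]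
    simp only [if_true]
    rfl
  | succ K ih =>
    have hK' : (K : Int) ≤ n + 1 := by push_cast at hK ⊢; omega
    rw [show (((K + 1 : Nat)) : Int) + 1 = ((K : Int) + 1) + 1 by push_cast; ring,
        PySem.List.pyRange_one_succ_right (a := 0) (b := (K : Int) + 1) (by omega),
        List.foldl_append]
    simp only [List.foldl_cons, List.foldl_nil]
    set T := (PySem.List.pyRange 0 ((K : Int) + 1) 1).foldl (stepA valence m) (initA n m)
      with hT
    have hTlen : T.length = (n + 2).toNat := by
      rw [hT, foldl_stepA_length, hinit]
    have ihK := ih hK'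
    simp only [stepA]
    have hrow : (PySem.List.pyRange 0 (m + 1) 1).map
        (fun p => if (K : Int) + 1 = 0 then 1
          else solveEntryA valence m (PySem.List.pyGetD T ((K : Int) + 1 - 1) []) ((K : Int) + 1) p) =
        rowsA valence m (K + 1) := by
      have hprev : PySem.List.pyGetD T ((K : Int) + 1 - 1) [] = rowsA valence m K := by
        rw [show (K : Int) + 1 - 1 = ((K : Nat) : Int) by ring, PySem.List.pyGetD_natCast,
            List.getD_eq_getElem?_getD, ihK]
        rfl
      rw [show rowsA valence m (K + 1) = (PySem.List.pyRange 0 (m + 1) 1).map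
        (fun p => solveEntryA valence m (rowsA valence m K) ((K : Int) + 1) p) from rfl]
      apply List.map_congr_left
      intro p _
      rw [if_neg (by omega), hprev]
    rw [hrow, show ((K : Int) + 1).toNat = K + 1 by omega]
    exact List.getElem?_set_self (by omega)

-- B's fold over positions 1..K computes rowsA K
theorem foldB_rows (valence : String) (m : Int) (hm : 0 ≤ m) (K : Nat) :
    (PySem.List.pyRange 1 ((K : Int) + 1) 1).foldl (stepB valence m)
      (List.replicate (m + 1).toNat 1) = rowsA valence m K := by
  induction K with
  | zero =>
    rw [PySem.List.pyRange_one_eq_nil (by omega)]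
    simp only [List.foldl_nil, rowsA]
    symm
    rw [List.eq_replicate_iff]
    exact ⟨by simp [PySem.List.length_pyRange_one], by simp⟩
  | succ K ih =>
    rw [show (((K : Nat) + 1 : Nat) : Int) + 1 = ((K : Int) + 1) + 1 by push_cast; ring,
        PySem.List.pyRange_one_succ_right (a := 1) (b := (K : Int) + 1) (by omega),
        List.foldl_append]
    simp only [List.foldl_cons, List.foldl_nil]
    rw [ih, stepB_eq valence m hm ((K : Int) + 1) (rowsA valence m K) (rowsA_length _ _ _)]
    rfl

-- ===== VERDICT (by name: the statement is the Claim_ definition above) =====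
theorem solve_spec : Claim_equal_solve := by
  intro n m valence _ hpre
  obtain ⟨hn, -⟩ := hpre
  unfold Spec_solve
  by_cases hm : m + 1 ≤ 0
  · -- width ≤ 0: every row is empty; both sides are 0
    rw [solve_eq]
    have hB : solve_alt n m valence = 0 := by
      simp only [solve_alt, if_pos hm]
    rw [hB]
    have hnil : ∀ x ∈ (PySem.List.pyRange 0 (n + 2) 1).foldl (stepA valence m) (initA n m),
        x = ([] : List Int) := by
      apply foldl_stepA_all_nil valence m hm
      intro x hx
      obtain ⟨_, _, hxe⟩ := List.mem_map.mp hx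
      rw [← hxe, PySem.List.pyRange_one_eq_nil hm, List.map_nil]
    rw [show n + 1 = (((n + 1).toNat : Nat) : Int) by omega, PySem.List.pyGetD_natCast,
        List.getD_eq_getElem?_getD]
    rcases hg : ((PySem.List.pyRange 0 (n + 2) 1).foldl (stepA valence m) (initA n m))[(n + 1).toNat]?
      with _ | x
    · rfl
    · rw [hnil x (List.mem_of_getElem? hg)]
      rfl
  · have hm' : (0 : Int) ≤ m := by omega
    set N := (n + 1).toNat with hNdef
    have hN : ((N : Nat) : Int) = n + 1 := Int.toNat_of_nonneg (by omega)
    rw [solve_eq, solve_alt_eq n m valence hm,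
        show n + 2 = ((N : Nat) : Int) + 1 by omega,
        foldB_rows valence m hm' N]
    congr 1
    rw [show n + 1 = ((N : Nat) : Int) from hN.symm, PySem.List.pyGetD_natCast,
        List.getD_eq_getElem?_getD,
        tblA_get valence m n hn N (by omega)]
    rfl
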